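-- pv_equiv track=rewrite | github.com/Rishabh5903/Competitive_Programming | Codeforces/contest 963 div 2/c.py | earliest_time_all_lights_on
-- ===== SOURCE A (Python) =====
-- def earliest_time_all_lights_on(t, cases):
--     results = []
--
--     for case in cases:
--         n, k = case[0], case[1]
--         a = case[2]
--
--         max_a = max(a)
--         found = False
--
--         # Check possible times from max_a to max_a + k - 1
--         for t in range(max_a, max_a + k):
--             if all(((t - ai) // k) % 2 == 0 for ai in a):
--                 results.append(t)
--                 found = True
--                 break
--
--         if not found:
--             results.append(-1)
--
--     return results
-- ===== SOURCE B (Python) =====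
-- def earliest_time_all_lights_on(t, cases):
--     # O(n) per case: each light allows a contiguous interval of offsets
--     # d in [0, k); intersect the intervals instead of scanning all k offsets.
--     results = []
--     for n, k, a in cases:
--         m = max(a)
--         if k <= 0:
--             results.append(-1)
--             continue
--         lo, hi = 0, k
--         for ai in a:
--             s = (m - ai) % (2 * k)
--             if s >= k:
--                 lo = max(lo, 2 * k - s)
--             elif s > 0:
--                 hi = min(hi, k - s)
--         results.append(m + lo if lo < hi else -1)
--     return results
-- ===== Notes on version B (the rewrite author's own statement) =====
-- stated objective: faster
-- what changed: Instead of scanning all k candidate times and testing every light at each (O(n*k) per case), B notes each light is on exactly on one contiguous sub-interval of offsets [0,k) and intersects these n intervals in a single pass over the lights (O(n) per case).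
import Mathlib
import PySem

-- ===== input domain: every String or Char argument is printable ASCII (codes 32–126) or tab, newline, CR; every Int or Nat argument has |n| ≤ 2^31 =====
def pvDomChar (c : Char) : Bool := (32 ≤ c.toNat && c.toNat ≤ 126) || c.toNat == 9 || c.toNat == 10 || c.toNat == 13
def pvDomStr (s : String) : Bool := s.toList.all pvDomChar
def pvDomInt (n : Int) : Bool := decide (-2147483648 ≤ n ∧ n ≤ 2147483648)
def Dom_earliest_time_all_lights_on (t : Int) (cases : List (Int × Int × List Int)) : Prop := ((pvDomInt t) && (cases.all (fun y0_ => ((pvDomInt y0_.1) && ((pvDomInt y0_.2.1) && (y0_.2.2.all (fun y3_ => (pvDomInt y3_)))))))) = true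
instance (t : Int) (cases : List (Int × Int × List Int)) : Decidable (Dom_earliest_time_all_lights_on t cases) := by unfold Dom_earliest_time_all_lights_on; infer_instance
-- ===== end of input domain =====

-- B replaces A's O(n*k)-per-case scan of all k candidate times by intersecting, in one
-- O(n) pass, the n contiguous offset intervals on which each light is on.

-- ===== PORT A =====
-- A's inner `for t in range(c, b): if all(...): append; break` = first t in [c,b) passing the
-- all-test, scanned lazily in increasing order exactly as Python's range loop does
def pvFindFirstA (k : Int) (a : List Int) (c b : Int) : Option Int :=
  if h : c < b then
    if a.all (fun ai => PySem.Int.mod (PySem.Int.floordiv (c - ai) k) 2 == 0)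
    then some c else pvFindFirstA k a (c + 1) b
  else none
termination_by (b - c).toNat
decreasing_by omega

def earliest_time_all_lights_on (t : Int) (cases : List (Int × Int × List Int)) : List Int :=
  cases.foldl (fun results c =>
    let k := c.2.1
    let a := c.2.2
    let max_a := (PySem.List.max? a (fun x => x)).getD 0   -- max(a); Python raises on [] (excluded by Pre_)
    match pvFindFirstA k a max_a (max_a + k) with
    | some tt => results ++ [tt]
    | none => results ++ [-1]) []

-- ===== PORT B =====
-- body of B's inner loop: shrink the intersection interval by light ai's interval
def pvStep (k m : Int) (p : Int × Int) (ai : Int) : Int × Int :=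
  let s := PySem.Int.mod (m - ai) (2 * k)
  if s ≥ k then (max p.1 (2 * k - s), p.2)
  else if s > 0 then (p.1, min p.2 (k - s))
  else p

def pvCaseB (k : Int) (a : List Int) : Int :=
  let m := (PySem.List.max? a (fun x => x)).getD 0   -- max(a); Python raises on [] (excluded by Pre_)
  if k ≤ 0 then -1
  else
    let p := a.foldl (pvStep k m) (0, k)
    if p.1 < p.2 then m + p.1 else -1

def earliest_time_all_lights_on_alt (t : Int) (cases : List (Int × Int × List Int)) : List Int :=
  cases.foldl (fun results c => results ++ [pvCaseB c.2.1 c.2.2]) []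

-- ===== PRECONDITION & SPEC =====
-- Pre_ excludes only cases with an empty light list, on which Python's max(a) raises ValueError.
def Pre_earliest_time_all_lights_on (t : Int) (cases : List (Int × Int × List Int)) : Prop :=
  ∀ c ∈ cases, c.2.2 ≠ []
instance (t : Int) (cases : List (Int × Int × List Int)) : Decidable (Pre_earliest_time_all_lights_on t cases) := by unfold Pre_earliest_time_all_lights_on; infer_instance
def pvWitness_earliest_time_all_lights_on : Int × (List (Int × Int × List Int)) := (1, [(2, 3, [1, 5])])

def Spec_earliest_time_all_lights_on (t : Int) (cases : List (Int × Int × List Int)) (out : List Int) : Prop := out = earliest_time_all_lights_on_alt t cases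
instance (t : Int) (cases : List (Int × Int × List Int)) (out : List Int) : Decidable (Spec_earliest_time_all_lights_on t cases out) := by unfold Spec_earliest_time_all_lights_on; infer_instance

-- ===== CLAIM (what is proved, stated in full; the proofs are below) =====
def Claim_equal_earliest_time_all_lights_on : Prop := ∀ (t : Int) (cases : List (Int × Int × List Int)), Dom_earliest_time_all_lights_on t cases → Pre_earliest_time_all_lights_on t cases → Spec_earliest_time_all_lights_on t cases (earliest_time_all_lights_on t cases)

-- ===== LEMMAS AND PROOFS =====

-- Light test in window form: ((x)//k) % 2 == 0 ↔ x % (2k) < k  (k > 0)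
theorem pv_parity_iff (k x : Int) (hk : 0 < k) :
    (PySem.Int.mod (PySem.Int.floordiv x k) 2 = 0) ↔ x % (2 * k) < k := by
  rw [PySem.Int.floordiv_eq_ediv_of_pos hk, PySem.Int.mod_eq_emod_of_pos (by norm_num : (0:Int) < 2)]
  have h2k : (0:Int) < 2 * k := by omega
  have hdm := Int.ediv_add_emod x (2 * k)
  have hr0 : 0 ≤ x % (2 * k) := Int.emod_nonneg x (by omega)
  have hr1 : x % (2 * k) < 2 * k := Int.emod_lt_of_pos x h2k
  set q2 := x / (2 * k) with hq2
  set r2 := x % (2 * k) with hr2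
  have hx : x = r2 + 2 * q2 * k := by linear_combination -hdm
  have hdiv : x / k = r2 / k + 2 * q2 := by
    rw [hx]; exact Int.add_mul_ediv_right r2 (2 * q2) (by omega)
  by_cases hcase : r2 < k
  · have : r2 / k = 0 := Int.ediv_eq_zero_of_lt hr0 hcase
    rw [hdiv, this]; constructor <;> intro _ <;> omega
  · have hsub : r2 = (r2 - k) + 1 * k := by ring
    have : r2 / k = (r2 - k) / k + 1 := by
      rw [hsub]; rw [Int.add_mul_ediv_right (r2 - k) 1 (by omega)]; ring_nf
    have hz : (r2 - k) / k = 0 := Int.ediv_eq_zero_of_lt (by omega) (by omega)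
    rw [hdiv, this, hz]
    constructor <;> intro h <;> omega

-- Per-light interval on offsets d ∈ [0,k): light (with shift x = m - ai) is on at time m + d
-- exactly on [lo_x, hi_x) with lo_x, hi_x as B computes them from s = x % (2k).
theorem pv_light_iff (k x d : Int) (hk : 0 < k) (hd0 : 0 ≤ d) (hdk : d < k) :
    (PySem.Int.mod (PySem.Int.floordiv (x + d) k) 2 = 0) ↔
      ((if PySem.Int.mod x (2 * k) ≥ k then 2 * k - PySem.Int.mod x (2 * k) else 0) ≤ d ∧
       d < (if 0 < PySem.Int.mod x (2 * k) ∧ PySem.Int.mod x (2 * k) < k then k - PySem.Int.mod x (2 * k) else k)) := by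
  rw [pv_parity_iff k (x + d) hk, PySem.Int.mod_eq_emod_of_pos (by omega : (0:Int) < 2 * k)]
  have h2k : (0:Int) < 2 * k := by omega
  have hs0 : 0 ≤ x % (2 * k) := Int.emod_nonneg x (by omega)
  have hs1 : x % (2 * k) < 2 * k := Int.emod_lt_of_pos x h2k
  set s := x % (2 * k) with hs
  have hcong : (x + d) % (2 * k) = (s + d) % (2 * k) := by
    rw [hs]; rw [Int.emod_add_emod]
  rw [hcong]
  by_cases hlt : s + d < 2 * k
  · have : (s + d) % (2 * k) = s + d := Int.emod_eq_of_lt (by omega) hlt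
    rw [this]; split_ifs <;> omega
  · have heq : (s + d) % (2 * k) = (s + d - 2 * k) % (2 * k) := (Int.sub_emod_right (s + d) (2 * k)).symm
    have : (s + d - 2 * k) % (2 * k) = s + d - 2 * k := Int.emod_eq_of_lt (by omega) (by omega)
    rw [heq, this]; split_ifs <;> omega

-- Invariant of B's fold: the accumulator is exactly the set of offsets on which all processed lights are on.
theorem pv_fold_inv (k m : Int) (hk : 0 < k) :
    ∀ (a : List Int) (lo hi : Int), 0 ≤ lo → hi ≤ k →
      0 ≤ (List.foldl (pvStep k m) (lo, hi) a).1 ∧ (List.foldl (pvStep k m) (lo, hi) a).2 ≤ k ∧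
      ∀ d, 0 ≤ d → d < k →
        (((List.foldl (pvStep k m) (lo, hi) a).1 ≤ d ∧ d < (List.foldl (pvStep k m) (lo, hi) a).2) ↔
         (lo ≤ d ∧ d < hi ∧ ∀ ai ∈ a, PySem.Int.mod (PySem.Int.floordiv ((m - ai) + d) k) 2 = 0)) := by
  intro a
  induction a with
  | nil => intro lo hi h0 h1; refine ⟨h0, h1, ?_⟩; simp
  | cons ai rest ih =>
      intro lo hi h0 h1
      simp only [List.foldl_cons]
      have hs0 : 0 ≤ PySem.Int.mod (m - ai) (2 * k) := by
        rw [PySem.Int.mod_eq_emod_of_pos (by omega : (0:Int) < 2 * k)]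
        exact Int.emod_nonneg _ (by omega)
      have hs1 : PySem.Int.mod (m - ai) (2 * k) < 2 * k := by
        rw [PySem.Int.mod_eq_emod_of_pos (by omega : (0:Int) < 2 * k)]
        exact Int.emod_lt_of_pos _ (by omega)
      set s := PySem.Int.mod (m - ai) (2 * k) with hsdef
      have hstep : pvStep k m (lo, hi) ai =
          ((if s ≥ k then max lo (2 * k - s) else lo), (if 0 < s ∧ s < k then min hi (k - s) else hi)) := by
        simp only [pvStep, ← hsdef]
        split_ifs with c1 c2 c3 c4 c5 <;> first | rfl | omega
      rw [hstep]
      obtain ⟨ih0, ih1, ihiff⟩ := ih (if s ≥ k then max lo (2 * k - s) else lo)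
        (if 0 < s ∧ s < k then min hi (k - s) else hi)
        (by split_ifs <;> omega) (by split_ifs <;> omega)
      refine ⟨ih0, ih1, ?_⟩
      intro d hd0 hdk
      rw [ihiff d hd0 hdk]
      have hlight := pv_light_iff k (m - ai) d hk hd0 hdk
      rw [← hsdef] at hlight
      simp only [List.mem_cons, forall_eq_or_imp]
      constructor
      · rintro ⟨ha, hb, hc⟩
        refine ⟨?_, ?_, ?_, hc⟩
        · split_ifs at ha hb <;> omega
        · split_ifs at ha hb <;> omega
        · rw [hlight]; split_ifs at ha hb ⊢ <;> omega
      · rintro ⟨ha, hb, hon, hc⟩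
        rw [hlight] at hon
        obtain ⟨hon1, hon2⟩ := hon
        refine ⟨?_, ?_, hc⟩ <;> split_ifs at hon1 hon2 ⊢ <;> omega

-- A's first-match scan over the window equals the left end of the interval (or none).
theorem pv_ff_aux (k m A B : Int) (a : List Int) (hB : B ≤ k)
    (hiff : ∀ tt, m ≤ tt → tt < m + k →
      ((a.all (fun ai => PySem.Int.mod (PySem.Int.floordiv (tt - ai) k) 2 == 0)) = true ↔ (A ≤ tt - m ∧ tt - m < B))) :
    ∀ (n : Nat) (c : Int), m ≤ c → (A < B → c ≤ m + A) → m + k - c ≤ n →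
      pvFindFirstA k a c (m + k) = if A < B then some (m + A) else none := by
  intro n
  induction n with
  | zero =>
      intro c hc hcA hn
      rw [pvFindFirstA, dif_neg (by omega : ¬ c < m + k)]
      have : ¬ A < B := by intro h; have := hcA h; omega
      simp [this]
  | succ n ih =>
      intro c hc hcA hn
      by_cases hend : m + k ≤ c
      · rw [pvFindFirstA, dif_neg (by omega : ¬ c < m + k)]
        have : ¬ A < B := by intro h; have := hcA h; omega
        simp [this]
      · rw [pvFindFirstA, dif_pos (by omega : c < m + k)]
        have hcI := hiff c hc (by omega)
        by_cases hp : (a.all (fun ai => PySem.Int.mod (PySem.Int.floordiv (c - ai) k) 2 == 0)) = true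
        · obtain ⟨hA1, hA2⟩ := hcI.mp hp
          have hAB : A < B := by omega
          have hceq : c = m + A := by have := hcA hAB; omega
          rw [if_pos hp, if_pos hAB]
          exact congrArg some hceq
        · rw [if_neg hp]
          exact ih (c + 1) (by omega)
            (fun hAB => by
              have h1 := hcA hAB
              rcases lt_or_eq_of_le h1 with h | h
              · omega
              · exfalso; exact hp (hcI.mpr (by omega)))
            (by omega)

-- Per-case agreement of the two ports.
theorem pv_case_eq (k : Int) (a : List Int) :
    (match pvFindFirstA k a ((PySem.List.max? a (fun x => x)).getD 0)
        ((PySem.List.max? a (fun x => x)).getD 0 + k) with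
     | some tt => tt
     | none => (-1 : Int)) = pvCaseB k a := by
  set m := (PySem.List.max? a (fun x => x)).getD 0 with hm
  by_cases hk : k ≤ 0
  · rw [pvFindFirstA, dif_neg (by omega : ¬ m < m + k)]
    simp [pvCaseB, hk]
  · have hk' : 0 < k := by omega
    obtain ⟨hp0, hp1, hiffd⟩ := pv_fold_inv k m hk' a 0 k le_rfl le_rfl
    set p := List.foldl (pvStep k m) (0, k) a with hp
    have hiff : ∀ tt, m ≤ tt → tt < m + k →
        ((a.all (fun ai => PySem.Int.mod (PySem.Int.floordiv (tt - ai) k) 2 == 0)) = true ↔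
          (p.1 ≤ tt - m ∧ tt - m < p.2)) := by
      intro tt h1 h2
      have hrw : ∀ ai : Int, tt - ai = (m - ai) + (tt - m) := by intro ai; ring
      rw [List.all_eq_true]
      constructor
      · intro h
        exact ((hiffd (tt - m) (by omega) (by omega)).mpr
          ⟨by omega, by omega, fun ai hai => by
            have := h ai hai; rw [hrw ai] at this; exact beq_iff_eq.mp this⟩)
      · intro h ai hai
        obtain ⟨_, _, hall⟩ := (hiffd (tt - m) (by omega) (by omega)).mp h
        have := hall ai hai
        rw [hrw ai]
        exact beq_iff_eq.mpr this
    have hff := pv_ff_aux k m p.1 p.2 a hp1 hiff k.toNat m le_rfl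
      (fun _ => by omega) (by omega)
    rw [hff]
    simp only [pvCaseB, ← hm, if_neg hk, ← hp]
    split_ifs with h <;> simp

theorem pv_fold_eq (cases : List (Int × Int × List Int)) :
    ∀ (init : List Int),
      List.foldl (fun results c =>
        let k := c.2.1
        let a := c.2.2
        let max_a := (PySem.List.max? a (fun x => x)).getD 0
        match pvFindFirstA k a max_a (max_a + k) with
        | some tt => results ++ [tt]
        | none => results ++ [-1]) init cases =
      List.foldl (fun results c => results ++ [pvCaseB c.2.1 c.2.2]) init cases := by
  induction cases with
  | nil => intro init; rfl
  | cons c rest ih =>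
      intro init
      simp only [List.foldl_cons]
      have hmatch : (match pvFindFirstA c.2.1 c.2.2 ((PySem.List.max? c.2.2 (fun x => x)).getD 0)
            ((PySem.List.max? c.2.2 (fun x => x)).getD 0 + c.2.1) with
          | some tt => init ++ [tt]
          | none => init ++ [-1]) = init ++ [pvCaseB c.2.1 c.2.2] := by
        rw [← pv_case_eq c.2.1 c.2.2]
        cases pvFindFirstA c.2.1 c.2.2 ((PySem.List.max? c.2.2 (fun x => x)).getD 0)
          ((PySem.List.max? c.2.2 (fun x => x)).getD 0 + c.2.1) <;> rfl
      rw [hmatch]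
      exact ih _

-- ===== VERDICT (by name: the statement is the Claim_ definition above) =====
theorem earliest_time_all_lights_on_spec : Claim_equal_earliest_time_all_lights_on := by
  intro t cases _ _
  unfold Spec_earliest_time_all_lights_on earliest_time_all_lights_on earliest_time_all_lights_on_alt
  exact pv_fold_eq cases []
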